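-- pv_equiv track=rewrite | github.com/adiashk/Search_Engine | parser_module.py | Named_Entity_Recognition
-- ===== SOURCE A (Python) =====
-- def Named_Entity_Recognition(text_tokens):
--     names = []
--     # upper_words = re.compile(r"[A-Z][a-z]+|[A-Z]+(?![a-z])").findall(text)
--     # upper_words = [w for w in text_tokens if w[0].isupper() and len(w) > 0]
--     upper_words = []
--     index = 0
--     while index < len(text_tokens):
--         term = text_tokens[index]
--         if len(term) > 0 and term[0].isupper():
--             next_index = index + 1
--             while next_index < len(text_tokens):
--                 next_term = text_tokens[next_index]
--                 if len(next_term) > 0 and next_term[0].isupper():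
--                     if '-' in next_term:
--                         next_term = next_term.replace('-', ' ')
--                     term += ' ' + next_term  # add the next word
--                     next_index += 1
--                 else:
--                     break
--             index = next_index
--             names.append(term)
--         else:
--             index += 1
--     return names
-- ===== SOURCE B (Python) =====
-- def Named_Entity_Recognition(text_tokens):
--     def is_cap(tok):
--         return len(tok) > 0 and tok[0].isupper()
--
--     def emit(run):
--         return run[0] + ''.join(' ' + w.replace('-', ' ') for w in run[1:])
--
--     names = []
--     run = []
--     for tok in text_tokens:
--         if is_cap(tok):
--             run.append(tok)
--         else:
--             if run:
--                 names.append(emit(run))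
--             run = []
--     if run:
--         names.append(emit(run))
--     return names
-- ===== Notes on version B (the rewrite author's own statement) =====
-- stated objective: idiomatic
-- what changed: Replaces A's nested index-jumping while loops with a single for-loop that collects each run of consecutive capitalized tokens into a list and emits the entity by joining the run (first token verbatim, later tokens with '-' replaced), flushing a trailing run after the loop.
import Mathlib
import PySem

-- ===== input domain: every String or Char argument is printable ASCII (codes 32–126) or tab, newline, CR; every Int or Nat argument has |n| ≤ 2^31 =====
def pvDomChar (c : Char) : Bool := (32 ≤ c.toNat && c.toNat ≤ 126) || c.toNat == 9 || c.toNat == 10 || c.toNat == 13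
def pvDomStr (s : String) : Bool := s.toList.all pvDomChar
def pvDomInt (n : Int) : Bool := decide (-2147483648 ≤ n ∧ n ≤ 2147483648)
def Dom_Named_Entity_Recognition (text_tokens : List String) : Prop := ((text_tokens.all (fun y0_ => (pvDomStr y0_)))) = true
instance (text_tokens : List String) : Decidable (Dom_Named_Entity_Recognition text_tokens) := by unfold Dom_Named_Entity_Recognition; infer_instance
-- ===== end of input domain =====

-- B replaces A's nested index-jumping while loops by one pass that collects each run of
-- consecutive capitalized tokens and joins it into the entity (idiomatic; same cost).


-- ===== PORT A =====
-- len(term) > 0 and term[0].isupper()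
def pvCapA (t : String) : Bool :=
  match t.toList with
  | [] => false
  | c :: _ => PySem.Chars.isupper c

-- A's inner while loop: extend `term` while the next token is capitalized
-- (strings built as List Char; PySem.Chars ops are the exact Python semantics).
def pvInnerA (term : List Char) : List String → List Char × List String
  | [] => (term, [])
  | t :: ts =>
    if pvCapA t then
      pvInnerA (term ++ (' ' :: (if PySem.Str.isIn "-" t then PySem.Chars.replace t.toList ['-'] [' '] else t.toList))) ts
    else (term, t :: ts)

theorem pvInnerA_rest_length (term : List Char) (ts : List String) :
    (pvInnerA term ts).2.length ≤ ts.length := by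
  induction ts generalizing term with
  | nil => simp [pvInnerA]
  | cons t ts ih =>
    simp only [pvInnerA]
    split
    · exact Nat.le_succ_of_le (ih _)
    · simp

-- A's outer while loop (index jumps to next_index after a run).
def pvOuterA : List String → List String
  | [] => []
  | t :: ts =>
    if pvCapA t then
      let p := pvInnerA t.toList ts
      String.ofList p.1 :: pvOuterA p.2
    else pvOuterA ts
termination_by xs => xs.length
decreasing_by
  · exact Nat.lt_succ_of_le (pvInnerA_rest_length _ _)
  · simp

def Named_Entity_Recognition (text_tokens : List String) : List String :=
  pvOuterA text_tokens

-- ===== PORT B =====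
def pvCapB (tok : String) : Bool :=
  match tok.toList with
  | [] => false
  | c :: _ => PySem.Chars.isupper c

-- ' ' + w.replace('-', ' ')
def pvRepB (w : String) : List Char := ' ' :: PySem.Chars.replace w.toList ['-'] [' ']

-- emit(run): run[0] + ''.join(' ' + w.replace('-', ' ') for w in run[1:])
def pvEmitB (run : List String) : String :=
  match run with
  | [] => ""
  | w :: ws => String.ofList (w.toList ++ PySem.Chars.join [] (ws.map pvRepB))

-- the 'if run: names.append(emit(run))' flush
def pvFlushB (names run : List String) : List String :=
  match run with
  | [] => names
  | _ :: _ => names ++ [pvEmitB run]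

-- the body of B's single for-loop, state = (names, run)
def pvStepB (st : List String × List String) (tok : String) : List String × List String :=
  if pvCapB tok then (st.1, st.2 ++ [tok]) else (pvFlushB st.1 st.2, [])

def Named_Entity_Recognition_alt (text_tokens : List String) : List String :=
  let st := text_tokens.foldl pvStepB ([], [])
  pvFlushB st.1 st.2

-- ===== PRECONDITION & SPEC =====
def Spec_Named_Entity_Recognition (text_tokens : List String) (out : List String) : Prop := out = Named_Entity_Recognition_alt text_tokens
instance (text_tokens : List String) (out : List String) : Decidable (Spec_Named_Entity_Recognition text_tokens out) := by unfold Spec_Named_Entity_Recognition; infer_instance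

-- ===== CLAIM (what is proved, stated in full; the proofs are below) =====
def Claim_equal_Named_Entity_Recognition : Prop := ∀ (text_tokens : List String), Dom_Named_Entity_Recognition text_tokens → Spec_Named_Entity_Recognition text_tokens (Named_Entity_Recognition text_tokens)

-- ===== LEMMAS AND PROOFS =====

theorem pvCapB_eq_capA (t : String) : pvCapB t = pvCapA t := rfl

-- ''.join is concatenation
theorem pvJoin_nil_eq_flatten (xss : List (List Char)) :
    PySem.Chars.join ([] : List Char) xss = xss.flatten := by
  unfold PySem.Chars.join
  induction xss with
  | nil => simp [List.intercalate]
  | cons x xs ih =>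
    cases xs with
    | nil => simp [List.intercalate]
    | cons y ys =>
      simp only [List.intercalate, List.intersperse] at *
      simpa using ih

-- replace is a no-op when the pattern does not occur
theorem pvReplaceGo_no_occur (fuel : Nat) (l acc : List Char) (h : '-' ∉ l) :
    PySem.Chars.replace.go ['-'] [' '] fuel l acc = acc.reverse ++ l := by
  induction fuel generalizing l acc with
  | zero => cases l <;> simp [PySem.Chars.replace.go]
  | succ fuel ih =>
    cases l with
    | nil => simp [PySem.Chars.replace.go]
    | cons c t =>
      have hc : c ≠ '-' := fun hc => h (hc ▸ List.mem_cons_self)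
      have hpre : List.isPrefixOf ['-'] (c :: t) = false := by
        simp [List.isPrefixOf]
        intro hcc; exact absurd hcc.symm hc
      simp only [PySem.Chars.replace.go, hpre]
      rw [ih t (c :: acc) (fun ht => h (List.mem_cons_of_mem _ ht))]
      simp

theorem pvReplace_no_occur (cs : List Char) (h : '-' ∉ cs) :
    PySem.Chars.replace cs ['-'] [' '] = cs := by
  unfold PySem.Chars.replace
  rw [if_neg (by simp)]
  exact pvReplaceGo_no_occur cs.length cs [] h

-- A's conditional replace equals B's unconditional replace
theorem pvCondReplace_eq (t : String) :
    (if PySem.Str.isIn "-" t then PySem.Chars.replace t.toList ['-'] [' '] else t.toList)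
      = PySem.Chars.replace t.toList ['-'] [' '] := by
  split
  · rfl
  · next hnot =>
    rw [pvReplace_no_occur]
    intro hmem
    apply hnot
    rw [PySem.Str.isIn_iff_infix]
    obtain ⟨l1, l2, hl⟩ := List.append_of_mem hmem
    exact ⟨l1, l2, by simp [hl]⟩

-- the glue string contributed by the non-first tokens of a run
def pvGlue (ws : List String) : List Char := (ws.map pvRepB).flatten

-- the common specification: group maximal runs of capitalized tokens
def pvSpec : List String → List String
  | [] => []
  | t :: ts =>
    if pvCapA t then
      String.ofList (t.toList ++ pvGlue (ts.takeWhile pvCapA)) :: pvSpec (ts.dropWhile pvCapA)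
    else pvSpec ts
termination_by xs => xs.length
decreasing_by
  · exact Nat.lt_succ_of_le (ts.length_dropWhile_le _)
  · simp

theorem pvInnerA_eq (ts : List String) (term : List Char) :
    pvInnerA term ts = (term ++ pvGlue (ts.takeWhile pvCapA), ts.dropWhile pvCapA) := by
  induction ts generalizing term with
  | nil => simp [pvInnerA, pvGlue]
  | cons t ts ih =>
    by_cases hc : pvCapA t = true
    · simp only [pvInnerA]
      rw [if_pos hc, pvCondReplace_eq, ih]
      simp [pvGlue, pvRepB, hc]
    · simp [pvInnerA, hc, pvGlue]

theorem pvOuterA_eq_spec_aux : ∀ (n : Nat) (xs : List String), xs.length ≤ n → pvOuterA xs = pvSpec xs := by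
  intro n
  induction n with
  | zero =>
    intro xs h
    rw [List.length_eq_zero_iff.mp (Nat.le_zero.mp h)]
    simp [pvOuterA, pvSpec]
  | succ n ih =>
    intro xs h
    cases xs with
    | nil => simp [pvOuterA, pvSpec]
    | cons t ts =>
      by_cases hc : pvCapA t = true
      · have h1 : (List.dropWhile pvCapA ts).length ≤ n :=
          le_trans (ts.length_dropWhile_le _) (Nat.le_of_succ_le_succ h)
        simp only [pvOuterA, pvSpec, hc, if_pos, pvInnerA_eq]
        rw [ih _ h1]
      · simp only [pvOuterA, pvSpec, hc]
        simp only [Bool.false_eq_true, if_false]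
        exact ih ts (Nat.le_of_succ_le_succ h)

theorem pvOuterA_eq_spec (xs : List String) : pvOuterA xs = pvSpec xs :=
  pvOuterA_eq_spec_aux xs.length xs le_rfl

-- what B's flush/fold would produce given current run and remaining tokens
def pvCont (run xs : List String) : List String :=
  match run with
  | [] => pvSpec xs
  | w :: ws =>
      String.ofList (w.toList ++ pvGlue ws ++ pvGlue (xs.takeWhile pvCapA)) :: pvSpec (xs.dropWhile pvCapA)

theorem pvFlushB_eq_cont_nil (names run : List String) :
    pvFlushB names run = names ++ pvCont run [] := by
  cases run with
  | nil => simp [pvFlushB, pvCont, pvSpec]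
  | cons w ws =>
    simp [pvFlushB, pvCont, pvSpec, pvEmitB, pvJoin_nil_eq_flatten, pvGlue]

theorem pvFoldB_eq (xs : List String) (names run : List String) :
    pvFlushB (xs.foldl pvStepB (names, run)).1 (xs.foldl pvStepB (names, run)).2
      = names ++ pvCont run xs := by
  induction xs generalizing names run with
  | nil => simpa using pvFlushB_eq_cont_nil names run
  | cons x xs ih =>
    by_cases hc : pvCapA x = true
    · have hstep : pvStepB (names, run) x = (names, run ++ [x]) := by
        simp [pvStepB, pvCapB_eq_capA, hc]
      rw [List.foldl_cons, hstep, ih]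
      cases run with
      | nil => simp [pvCont, pvSpec, hc, pvGlue]
      | cons w ws =>
        simp [pvCont, hc, pvGlue]
    · have hstep : pvStepB (names, run) x = (pvFlushB names run, []) := by
        simp [pvStepB, pvCapB_eq_capA, hc]
      rw [List.foldl_cons, hstep, ih]
      cases run with
      | nil => simp [pvFlushB, pvCont, pvSpec, hc]
      | cons w ws =>
        simp [pvFlushB, pvCont, pvSpec, hc, pvEmitB, pvJoin_nil_eq_flatten, pvGlue]

theorem pvAlt_eq_spec (xs : List String) : Named_Entity_Recognition_alt xs = pvSpec xs := by
  unfold Named_Entity_Recognition_alt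
  simpa [pvCont] using pvFoldB_eq xs [] []

-- ===== VERDICT (by name: the statement is the Claim_ definition above) =====
theorem Named_Entity_Recognition_spec : Claim_equal_Named_Entity_Recognition := by
  intro xs _
  unfold Spec_Named_Entity_Recognition Named_Entity_Recognition
  rw [pvOuterA_eq_spec, pvAlt_eq_spec]
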